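-- pv_equiv track=rewrite | github.com/Yixi-Rao/COMP4620 | A3/comp4620-2021-s2-assignment1/code/connectedcomp.py | secondDFS
-- ===== SOURCE A (Python) =====
-- def secondDFS(state, visited, graph):
--     visited[state] = True
--     SCC1 = [state]
--
--     for s in graph[state]:
--         if visited[s] == False:
--             SCC2 = secondDFS(s, visited, graph)
--             SCC1 = SCC1 + SCC2
--     return SCC1
-- ===== SOURCE B (Python) =====
-- def secondDFS(state, visited, graph):
--     # Iterative DFS with an explicit stack instead of recursion; same visited
--     # mutations and the same preorder output (check at pop, children pushed in
--     # reversed order), no call stack growth on deep graphs.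
--     visited[state] = True
--     out = [state]
--     stack = list(reversed(graph[state]))
--     while stack:
--         node = stack.pop()
--         if visited[node] == False:
--             visited[node] = True
--             out.append(node)
--             stack.extend(reversed(graph[node]))
--     return out
-- ===== Notes on version B (the rewrite author's own statement) =====
-- stated objective: alternative
-- what changed: The recursive DFS (one Python call frame per component node, concatenating sub-lists) is replaced by an iterative DFS over an explicit stack: pop a node, skip it if already visited, otherwise mark it, append it to the output and push its neighbors in reversed order; this yields the same preorder and the same visited mutations without recursion (no RecursionError on deep graphs).
import Mathlib
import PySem

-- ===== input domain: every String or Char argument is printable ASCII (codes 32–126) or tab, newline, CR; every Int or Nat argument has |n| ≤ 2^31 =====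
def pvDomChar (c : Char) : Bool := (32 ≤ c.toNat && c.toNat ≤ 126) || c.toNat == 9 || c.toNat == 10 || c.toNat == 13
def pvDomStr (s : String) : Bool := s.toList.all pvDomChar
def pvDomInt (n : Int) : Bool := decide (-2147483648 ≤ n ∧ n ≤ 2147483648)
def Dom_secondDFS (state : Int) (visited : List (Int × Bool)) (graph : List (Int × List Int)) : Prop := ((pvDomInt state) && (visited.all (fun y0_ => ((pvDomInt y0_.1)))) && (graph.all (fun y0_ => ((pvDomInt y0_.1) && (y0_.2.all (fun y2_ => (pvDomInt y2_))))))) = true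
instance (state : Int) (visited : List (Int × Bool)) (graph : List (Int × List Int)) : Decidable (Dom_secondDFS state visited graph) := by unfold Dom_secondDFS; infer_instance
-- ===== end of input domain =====

-- B replaces A's recursive DFS by an iterative explicit-stack DFS (check at pop,
-- children pushed in reversed order), same preorder output; both mutate the Python
-- `visited` dict identically, the theorems below are about the return value.

-- number of False entries of the visited dict: the termination measure of both ports
def pvFalse (v : PySem.Dict Int Bool) : Nat := (v.items.filter (fun p => p.2 == false)).length

-- counting lemmas: overwriting a key currently mapped to False with True strictly
-- decreases pvFalse (pvFalse_insert_lt below, cited by the ports' decreasing_by)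
theorem pvCnt_map_le (k : Int) (l : List (Int × Bool)) :
    List.countP (fun p => p.2 == false) (l.map (fun p => if p.1 == k then (k, true) else p))
      ≤ List.countP (fun p => p.2 == false) l := by
  induction l with
  | nil => simp
  | cons a t ih =>
    simp only [List.map_cons, List.countP_cons]
    by_cases h : (a.1 == k) = true
    · rw [if_pos h]
      have hq : (((k, true) : Int × Bool).2 == false) = false := rfl
      rw [hq]
      simp only [Bool.false_eq_true, if_false]
      split <;> omega
    · rw [if_neg h]
      omega

theorem pvCnt_map_lt (k : Int) (l : List (Int × Bool)) (pr : Int × Bool)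
    (hf : l.find? (fun p => p.1 == k) = some pr) (hpr : pr.2 = false) :
    List.countP (fun p => p.2 == false) (l.map (fun p => if p.1 == k then (k, true) else p))
      < List.countP (fun p => p.2 == false) l := by
  induction l with
  | nil => simp at hf
  | cons a t ih =>
    simp only [List.map_cons, List.countP_cons]
    by_cases h : (a.1 == k) = true
    · simp only [List.find?_cons, h] at hf
      injection hf with hf; subst hf
      rw [if_pos h]
      have hq : (((k, true) : Int × Bool).2 == false) = false := rfl
      have ha : ((a.2 == false) = true) := by rw [hpr]; rfl
      rw [hq, if_pos ha]
      simp only [Bool.false_eq_true, if_false]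
      have := pvCnt_map_le k t
      omega
    · simp only [List.find?_cons, h] at hf
      have := ih hf
      rw [if_neg h]
      split <;> omega

theorem pvFalse_insert_lt (v : PySem.Dict Int Bool) (k : Int)
    (h : v.get? k = some false) : pvFalse (v.insert k true) < pvFalse v := by
  have hc : v.contains k = true := by
    rw [PySem.Dict.contains_eq_isSome_get?, h]; rfl
  obtain ⟨pr, hpr, hpr2⟩ : ∃ pr, v.items.find? (fun p => p.1 == k) = some pr ∧ pr.2 = false := by
    unfold PySem.Dict.get? at h
    cases hf : v.items.find? (fun p => p.1 == k) with
    | none => rw [hf] at h; simp at h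
    | some pr => rw [hf] at h; simp at h; exact ⟨pr, rfl, h⟩
  unfold pvFalse PySem.Dict.insert
  rw [if_pos hc]
  rw [← List.countP_eq_length_filter, ← List.countP_eq_length_filter]
  exact pvCnt_map_lt k v.items pr hpr hpr2

-- ===== PORT A =====
-- A's recursion, transliterated; the subtype on the returned visited dict and the
-- `pvFalse` measure are termination scaffolding only (they carry no extra computation).
mutual
def dfsA (state : Int) (v : PySem.Dict Int Bool) (g : PySem.Dict Int (List Int)) :
    Option (List Int × {v' : PySem.Dict Int Bool // pvFalse v' ≤ pvFalse (v.insert state true)}) :=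
  -- visited[state] = True; SCC1 = [state]; for s in graph[state]: …
  match g.get? state with
  | none => none            -- KeyError: graph[state]
  | some ns => dfsLoopA ns [state] (v.insert state true) g
termination_by (pvFalse (v.insert state true), 1, 0)
decreasing_by
  exact Prod.Lex.right _ (Prod.Lex.left _ _ (by omega))

def dfsLoopA (ns : List Int) (acc : List Int) (v : PySem.Dict Int Bool)
    (g : PySem.Dict Int (List Int)) :
    Option (List Int × {v' : PySem.Dict Int Bool // pvFalse v' ≤ pvFalse v}) :=
  match ns with
  | [] => some (acc, ⟨v, Nat.le_refl _⟩)
  | s :: rest =>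
    match hv : v.get? s with
    | none => none          -- KeyError: visited[s]
    | some b =>
      if hb : b = false then
        match dfsA s v g with
        | none => none
        | some (scc2, ⟨v2, h2⟩) =>
          match dfsLoopA rest (acc ++ scc2) v2 g with
          | none => none
          | some (sccF, ⟨vF, hF⟩) =>
            some (sccF, ⟨vF, le_trans hF (le_trans h2 (Nat.le_of_lt
              (pvFalse_insert_lt v s (by rw [hb] at hv; exact hv))))⟩)
      else
        dfsLoopA rest acc v g
termination_by (pvFalse v, 0, ns.length)
decreasing_by
  · exact Prod.Lex.left _ _ (pvFalse_insert_lt v s (by rw [hb] at hv; exact hv))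
  · exact Prod.Lex.left _ _ (Nat.lt_of_le_of_lt h2 (pvFalse_insert_lt v s (by rw [hb] at hv; exact hv)))
  · exact Prod.Lex.right _ (Prod.Lex.right _ (by simp))
end

def secondDFS (state : Int) (visited : List (Int × Bool)) (graph : List (Int × List Int)) : List Int :=
  match dfsA state (PySem.Dict.mk visited) (PySem.Dict.mk graph) with
  | some r => r.1
  | none => []              -- unreachable under Pre_ (a KeyError in Python)

-- ===== PORT B =====
-- the while loop of Source B: the stack top is the END of the list (stack.pop()),
-- and stack.extend(reversed(graph[node])) appends the reversed neighbor list
def bLoop (stack : List Int) (v : PySem.Dict Int Bool) (g : PySem.Dict Int (List Int))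
    (out : List Int) : Option (List Int × PySem.Dict Int Bool) :=
  match hp : PySem.List.pop? stack with
  | none => some (out, v)   -- while stack: … fell through
  | some (node, rest) =>
    match hv : v.get? node with
    | none => none          -- KeyError: visited[node]
    | some b =>
      if hb : b = false then
        match g.get? node with
        | none => none      -- KeyError: graph[node]
        | some ns => bLoop (rest ++ ns.reverse) (v.insert node true) g (out ++ [node])
      else bLoop rest v g out
termination_by (pvFalse v, stack.length)
decreasing_by
  · exact Prod.Lex.left _ _ (pvFalse_insert_lt v node (by rw [hb] at hv; exact hv))
  · have hlen : rest.length + 1 = stack.length := PySem.List.length_of_pop?_eq_some stack hp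
    exact Prod.Lex.right _ (by omega)

def secondDFS_alt (state : Int) (visited : List (Int × Bool)) (graph : List (Int × List Int)) : List Int :=
  match (PySem.Dict.mk graph).get? state with
  | none => []              -- unreachable under Pre_ (a KeyError in Python)
  | some ns =>
    match bLoop ns.reverse ((PySem.Dict.mk visited).insert state true) (PySem.Dict.mk graph) [state] with
    | some r => r.1
    | none => []

-- ===== PRECONDITION & SPEC =====
-- pvReach computes the set of nodes the DFS visits: the closure of {state} under
-- edges leading to initially-unvisited (False) nodes; it is a fixpoint iteration
-- that stabilizes within |visited| steps (pvReach_fixed below), not a DFS replay.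
def pvNbrs (g : List (Int × List Int)) (u : Int) : List Int := (PySem.Dict.mk g).getD u []

def pvStep (v : List (Int × Bool)) (g : List (Int × List Int)) (R : List Int) : List Int :=
  R ++ PySem.List.dedup ((R.flatMap (pvNbrs g)).filter
    (fun n => ((PySem.Dict.mk v).get? n == some false) && !R.contains n))

def pvReach (state : Int) (v : List (Int × Bool)) (g : List (Int × List Int)) : List Int :=
  (pvStep v g)^[v.length + 1] [state]

-- Pre_ excludes exactly the inputs on which A raises KeyError: every node the DFS
-- visits (pvReach) must have a graph entry, and every neighbor it scans must have a
-- visited entry (or be `state`, which A marks before any read).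
def Pre_secondDFS (state : Int) (visited : List (Int × Bool)) (graph : List (Int × List Int)) : Prop :=
  ∀ u ∈ pvReach state visited graph,
    ((PySem.Dict.mk graph).get? u).isSome = true ∧
    ∀ s ∈ pvNbrs graph u, s = state ∨ ((PySem.Dict.mk visited).get? s).isSome = true
instance (state : Int) (visited : List (Int × Bool)) (graph : List (Int × List Int)) : Decidable (Pre_secondDFS state visited graph) := by unfold Pre_secondDFS; infer_instance

def pvWitness_secondDFS : Int × (List (Int × Bool)) × (List (Int × List Int)) :=
  (0, [(0, false), (1, false), (2, true)], [(0, [1, 2]), (1, [0]), (2, [1])])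

def Spec_secondDFS (state : Int) (visited : List (Int × Bool)) (graph : List (Int × List Int)) (out : List Int) : Prop := out = secondDFS_alt state visited graph
instance (state : Int) (visited : List (Int × Bool)) (graph : List (Int × List Int)) (out : List Int) : Decidable (Spec_secondDFS state visited graph out) := by unfold Spec_secondDFS; infer_instance

-- ===== CLAIM (what is proved, stated in full; the proofs are below) =====
def Claim_equal_secondDFS : Prop := ∀ (state : Int) (visited : List (Int × Bool)) (graph : List (Int × List Int)), Dom_secondDFS state visited graph → Pre_secondDFS state visited graph → Spec_secondDFS state visited graph (secondDFS state visited graph)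

-- ===== LEMMAS AND PROOFS =====

-- ---- closure facts about pvReach ----
theorem pvStep_subset (v : List (Int × Bool)) (g : List (Int × List Int)) (R : List Int) :
    R ⊆ pvStep v g R := fun _ hx => List.mem_append_left _ hx

theorem pvStep_nodup (v : List (Int × Bool)) (g : List (Int × List Int)) (R : List Int)
    (h : R.Nodup) : (pvStep v g R).Nodup := by
  unfold pvStep
  refine List.Nodup.append h (PySem.List.nodup_dedup _) ?_
  intro a haR hadd
  have := (PySem.List.mem_dedup _ a).mp hadd
  have hcond := List.of_mem_filter this
  simp only [Bool.and_eq_true, Bool.not_eq_true'] at hcond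
  have : R.contains a = true := List.elem_eq_true_of_mem haR
  rw [hcond.2] at this
  cases this

theorem pvStep_mem (v : List (Int × Bool)) (g : List (Int × List Int)) (R : List Int)
    (n : Int) (hn : n ∈ pvStep v g R) : n ∈ R ∨ n ∈ v.map Prod.fst := by
  unfold pvStep at hn
  rcases List.mem_append.mp hn with h | h
  · exact Or.inl h
  · right
    have hcond := List.of_mem_filter ((PySem.List.mem_dedup _ n).mp h)
    simp only [Bool.and_eq_true, beq_iff_eq] at hcond
    have : (n, false) ∈ (PySem.Dict.mk v).items :=
      PySem.Dict.mem_items_of_get?_eq_some _ hcond.1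
    exact List.mem_map_of_mem this

theorem pvIter_nodup (v : List (Int × Bool)) (g : List (Int × List Int)) (state : Int) :
    ∀ k, ((pvStep v g)^[k] [state]).Nodup := by
  intro k
  induction k with
  | zero => simp
  | succ k ih => rw [Function.iterate_succ_apply']; exact pvStep_nodup v g _ ih

theorem pvIter_subset (v : List (Int × Bool)) (g : List (Int × List Int)) (state : Int) :
    ∀ k, (pvStep v g)^[k] [state] ⊆ state :: v.map Prod.fst := by
  intro k
  induction k with
  | zero => intro a ha; simp at ha; simp [ha]
  | succ k ih =>
    rw [Function.iterate_succ_apply']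
    intro a ha
    rcases pvStep_mem v g _ a ha with h | h
    · exact ih h
    · exact List.mem_cons_of_mem _ h

theorem pvStep_grow (v : List (Int × Bool)) (g : List (Int × List Int)) (R : List Int) :
    pvStep v g R = R ∨ R.length < (pvStep v g R).length := by
  cases hd : PySem.List.dedup ((R.flatMap (pvNbrs g)).filter
      (fun n => ((PySem.Dict.mk v).get? n == some false) && !R.contains n)) with
  | nil => left; unfold pvStep; rw [hd, List.append_nil]
  | cons x xs => right; unfold pvStep; rw [hd]; simp

theorem pvIter_fix_or_grow (v : List (Int × Bool)) (g : List (Int × List Int)) (state : Int) :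
    ∀ k, pvStep v g ((pvStep v g)^[k] [state]) = (pvStep v g)^[k] [state] ∨
         k + 1 ≤ ((pvStep v g)^[k] [state]).length := by
  intro k
  induction k with
  | zero => right; simp
  | succ k ih =>
    by_cases hfix : pvStep v g ((pvStep v g)^[k] [state]) = (pvStep v g)^[k] [state]
    · left
      rw [Function.iterate_succ_apply', hfix, hfix]
    · rcases ih with h | h
      · exact absurd h hfix
      · right
        rw [Function.iterate_succ_apply']
        rcases pvStep_grow v g ((pvStep v g)^[k] [state]) with he | hg
        · exact absurd he hfix
        · omega

theorem pvReach_fixed (state : Int) (v : List (Int × Bool)) (g : List (Int × List Int)) :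
    pvStep v g (pvReach state v g) = pvReach state v g := by
  unfold pvReach
  rcases pvIter_fix_or_grow v g state (v.length + 1) with h | h
  · exact h
  · exfalso
    have hle := List.Subperm.length_le
      ((pvIter_nodup v g state (v.length + 1)).subperm (pvIter_subset v g state (v.length + 1)))
    simp only [List.length_cons, List.length_map] at hle
    omega

theorem pvReach_self (state : Int) (v : List (Int × Bool)) (g : List (Int × List Int)) :
    state ∈ pvReach state v g := by
  unfold pvReach
  have : ∀ k, state ∈ (pvStep v g)^[k] [state] := by
    intro k
    induction k with
    | zero => simp
    | succ k ih => rw [Function.iterate_succ_apply']; exact pvStep_subset v g _ ih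
  exact this _

theorem pvReach_closed (state : Int) (v : List (Int × Bool)) (g : List (Int × List Int))
    (u n : Int) (hu : u ∈ pvReach state v g) (hn : n ∈ pvNbrs g u)
    (hf : (PySem.Dict.mk v).get? n = some false) : n ∈ pvReach state v g := by
  by_cases hR : n ∈ pvReach state v g
  · exact hR
  · rw [← pvReach_fixed state v g]
    unfold pvStep
    apply List.mem_append_right
    rw [PySem.List.mem_dedup]
    apply List.mem_filter_of_mem
    · exact List.mem_flatMap_of_mem hu hn
    · simp only [Bool.and_eq_true, beq_iff_eq, Bool.not_eq_true']
      refine ⟨hf, ?_⟩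
      cases hc : (pvReach state v g).contains n
      · rfl
      · exact absurd (List.mem_of_elem_eq_true hc) hR

-- ---- dict invariant helpers ----
theorem pvIsSome_insert (v : PySem.Dict Int Bool) (k n : Int) (b : Bool)
    (h : (v.get? n).isSome = true) : ((v.insert k b).get? n).isSome = true := by
  rw [PySem.Dict.get?_insert]
  split <;> simp [h]

-- the simulation: running A's neighbor loop on ns equals B's stack loop consuming
-- the top segment ns.reverse of the stack; Δ is the list of nodes both append, v'
-- the final dict. Invariants: every False entry of v was already False initially,
-- every initially-present key (and state) is present in v, and every pending node
-- is a neighbor of a node in pvReach.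
theorem pvBridge (state : Int) (v0 : List (Int × Bool)) (g0 : List (Int × List Int))
    (hPre : Pre_secondDFS state v0 g0) :
    ∀ (N : Nat) (v : PySem.Dict Int Bool), pvFalse v < N →
    (∀ k, v.get? k = some false → (PySem.Dict.mk v0).get? k = some false) →
    (∀ k, (k = state ∨ ((PySem.Dict.mk v0).get? k).isSome = true) → (v.get? k).isSome = true) →
    ∀ ns : List Int, (∀ n ∈ ns, ∃ u ∈ pvReach state v0 g0, n ∈ pvNbrs g0 u) →
    ∃ (Δ : List Int) (v' : PySem.Dict Int Bool),
      (∀ acc, Option.map (fun r => (r.1, r.2.1)) (dfsLoopA ns acc v (PySem.Dict.mk g0)) = some (acc ++ Δ, v')) ∧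
      (∀ rest out, bLoop (rest ++ ns.reverse) v (PySem.Dict.mk g0) out = bLoop rest v' (PySem.Dict.mk g0) (out ++ Δ)) ∧
      (∀ k, v'.get? k = some false → (PySem.Dict.mk v0).get? k = some false) ∧
      (∀ k : Int, (v.get? k).isSome = true → (v'.get? k).isSome = true) ∧
      pvFalse v' ≤ pvFalse v := by
  intro N
  induction N with
  | zero => intro v hv; omega
  | succ N ih =>
    intro v hvN hI1 hI2 ns
    induction ns with
    | nil =>
      intro _
      exact ⟨[], v, by intro acc; rw [dfsLoopA]; simp, by intro rest out; simp,
        hI1, fun k h => h, Nat.le_refl _⟩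
    | cons s rest ihns =>
      intro hns
      obtain ⟨u, hu, hsu⟩ := hns s (by simp)
      have hvs : (v.get? s).isSome = true := hI2 s ((hPre u hu).2 s hsu)
      cases hb : v.get? s with
      | none => rw [hb] at hvs; simp at hvs
      | some b =>
        cases b with
        | true =>
          obtain ⟨Δ, v', P, B, I1', K, F⟩ := ihns (fun n hn => hns n (by simp [hn]))
          refine ⟨Δ, v', ?_, ?_, I1', K, F⟩
          · intro acc
            rw [dfsLoopA]
            split
            · rename_i heq; rw [hb] at heq; cases heq
            · rename_i b' heq
              rw [hb] at heq; injection heq with heq; subst heq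
              rw [dif_neg (by simp)]
              exact P acc
          · intro rest' out
            rw [show rest' ++ (s :: rest).reverse = (rest' ++ rest.reverse) ++ [s] by
              simp [List.reverse_cons]]
            rw [bLoop]
            rw [PySem.List.pop?_last]
            split
            · rename_i heq; cases heq
            · rename_i node rst heq
              injection heq with heq1; injection heq1 with h1 h2; subst h1; subst h2
              split
              · rename_i heq; rw [hb] at heq; cases heq
              · rename_i b' heq
                rw [hb] at heq; injection heq with heq; subst heq
                rw [dif_neg (by simp)]
                exact B rest' out
        | false =>
          have hv0s : (PySem.Dict.mk v0).get? s = some false := hI1 s hb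
          have hsC : s ∈ pvReach state v0 g0 := pvReach_closed state v0 g0 u s hu hsu hv0s
          have hlt : pvFalse (v.insert s true) < pvFalse v := pvFalse_insert_lt v s hb
          obtain ⟨ns2, hns2⟩ := Option.isSome_iff_exists.mp (hPre s hsC).1
          have hnbrs : pvNbrs g0 s = ns2 := by
            unfold pvNbrs
            rw [PySem.Dict.getD_eq_get?_getD, hns2]; rfl
          have hI1' : ∀ k, (v.insert s true).get? k = some false →
              (PySem.Dict.mk v0).get? k = some false := by
            intro k hk
            rw [PySem.Dict.get?_insert] at hk
            by_cases hks : k = s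
            · rw [if_pos hks] at hk; cases hk
            · rw [if_neg hks] at hk; exact hI1 k hk
          have hI2' : ∀ k, (k = state ∨ ((PySem.Dict.mk v0).get? k).isSome = true) →
              ((v.insert s true).get? k).isSome = true :=
            fun k hk => pvIsSome_insert v s k true (hI2 k hk)
          -- first recursive run: A's dfsA on s ≡ B consuming ns2.reverse
          obtain ⟨Δ2, v2, P2, B2, I12, K2, F2⟩ :=
            ih (v.insert s true) (by omega) hI1' hI2' ns2
              (fun n hn => ⟨s, hsC, by rw [hnbrs]; exact hn⟩)
          -- rest of the loop, from v2
          obtain ⟨Δ3, v3, P3, B3, I13, K3, F3⟩ :=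
            ih v2 (by omega)
              I12
              (fun k hk => K2 k (hI2' k hk))
              rest (fun n hn => hns n (by simp [hn]))
          have hdfsA : Option.map (fun r => (r.1, r.2.1)) (dfsA s v (PySem.Dict.mk g0))
              = some (s :: Δ2, v2) := by
            rw [dfsA]
            simp only [hns2]
            have := P2 [s]
            simpa using this
          refine ⟨s :: (Δ2 ++ Δ3), v3, ?_, ?_, I13,
            fun k h => K3 k (K2 k (pvIsSome_insert v s k true h)),
            le_trans F3 (le_trans F2 (Nat.le_of_lt hlt))⟩
          · intro acc
            rw [dfsLoopA]
            split
            · rename_i heq; rw [hb] at heq; cases heq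
            · rename_i b' heq
              rw [hb] at heq; injection heq with heq; subst heq
              rw [dif_pos rfl]
              cases hA : dfsA s v (PySem.Dict.mk g0) with
              | none => rw [hA] at hdfsA; simp at hdfsA
              | some r =>
                rw [hA] at hdfsA
                obtain ⟨r1, rv, hrle⟩ := r
                simp only [Option.map_some, Option.some.injEq, Prod.mk.injEq] at hdfsA
                obtain ⟨h1, h2⟩ := hdfsA
                dsimp only
                subst h1 h2
                have hP3 := P3 (acc ++ (s :: Δ2))
                cases hL : dfsLoopA rest (acc ++ (s :: Δ2)) rv (PySem.Dict.mk g0) with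
                | none => rw [hL] at hP3; simp at hP3
                | some q =>
                  rw [hL] at hP3
                  obtain ⟨q1, qv, hq⟩ := q
                  simp only [Option.map_some, Option.some.injEq, Prod.mk.injEq] at hP3
                  simp [hP3.1, hP3.2]
          · intro rest' out
            rw [show rest' ++ (s :: rest).reverse = (rest' ++ rest.reverse) ++ [s] by
              simp [List.reverse_cons]]
            rw [bLoop]
            rw [PySem.List.pop?_last]
            split
            · rename_i heq; cases heq
            · rename_i node rst heq
              injection heq with heq1; injection heq1 with h1 h2; subst h1; subst h2
              split
              · rename_i heq; rw [hb] at heq; cases heq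
              · rename_i b' heq
                rw [hb] at heq; injection heq with heq; subst heq
                rw [dif_pos rfl]
                simp only [hns2]
                rw [B2 (rest' ++ rest.reverse) (out ++ [s])]
                have hB3 := B3 rest' (out ++ [s] ++ Δ2)
                simpa [List.append_assoc] using hB3

-- ===== VERDICT =====
theorem secondDFS_spec : Claim_equal_secondDFS := by
  intro state visited graph _ hpre
  unfold Spec_secondDFS secondDFS secondDFS_alt
  obtain ⟨ns, hns⟩ := Option.isSome_iff_exists.mp (hpre state (pvReach_self state visited graph)).1
  have hnbrs : pvNbrs graph state = ns := by
    unfold pvNbrs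
    rw [PySem.Dict.getD_eq_get?_getD, hns]; rfl
  have hI1 : ∀ k, ((PySem.Dict.mk visited).insert state true).get? k = some false →
      (PySem.Dict.mk visited).get? k = some false := by
    intro k hk
    rw [PySem.Dict.get?_insert] at hk
    by_cases hks : k = state
    · rw [if_pos hks] at hk; cases hk
    · rw [if_neg hks] at hk; exact hk
  have hI2 : ∀ k, (k = state ∨ ((PySem.Dict.mk visited).get? k).isSome = true) →
      (((PySem.Dict.mk visited).insert state true).get? k).isSome = true := by
    intro k hk
    rcases hk with hk | hk
    · subst hk; rw [PySem.Dict.get?_insert_self]; rfl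
    · exact pvIsSome_insert _ state k true hk
  obtain ⟨Δ, v', P, B, _, _, _⟩ :=
    pvBridge state visited graph hpre
      (pvFalse ((PySem.Dict.mk visited).insert state true) + 1)
      ((PySem.Dict.mk visited).insert state true) (by omega) hI1 hI2 ns
      (fun n hn => ⟨state, pvReach_self state visited graph, by rw [hnbrs]; exact hn⟩)
  have hB2 : bLoop ns.reverse ((PySem.Dict.mk visited).insert state true)
      (PySem.Dict.mk graph) [state] = some ([state] ++ Δ, v') := by
    have hB := B [] [state]
    rw [List.nil_append] at hB
    rw [hB, bLoop]
    rfl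
  rw [dfsA]
  simp only [hns, hB2]
  have hP := P [state]
  cases hL : dfsLoopA ns [state] ((PySem.Dict.mk visited).insert state true) (PySem.Dict.mk graph) with
  | none => rw [hL] at hP; simp at hP
  | some r =>
    rw [hL] at hP
    simp only [Option.map_some, Option.some.injEq, Prod.mk.injEq] at hP
    simp [hP.1]
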